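-- pv_equiv track=rewrite | github.com/sunnynexus/RetroLLM | scripts/generate.py | find_next_tokens
-- ===== SOURCE A (Python) =====
-- def find_next_tokens(sentence_prefix, window_sequence):
--     next_tokens_set = set()  # 初始化集合
--     prefix_length = len(sentence_prefix)
--     for i in range(len(window_sequence) - prefix_length + 1):
--         if window_sequence[i:i + prefix_length] == sentence_prefix:  # 检查当前位置是否与prefix匹配
--             if i + prefix_length < len(window_sequence):  # 如果匹配，检查是否有下一个token
--                 next_tokens_set.add(window_sequence[i + prefix_length])
--     return next_tokens_set
-- ===== SOURCE B (Python) =====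
-- def find_next_tokens(sentence_prefix, window_sequence):
--     # column-wise candidate filtering: keep all start positions, prune by one
--     # pattern position at a time, then collect the token after each survivor
--     n = len(window_sequence)
--     m = len(sentence_prefix)
--     cands = list(range(n - m + 1))
--     for k in range(m):
--         t = sentence_prefix[k]
--         cands = [i for i in cands if window_sequence[i + k] == t]
--     next_tokens_set = set()
--     for i in cands:
--         if i + m < n:
--             next_tokens_set.add(window_sequence[i + m])
--     return next_tokens_set
-- ===== Notes on version B (the rewrite author's own statement) =====
-- stated objective: alternative
-- what changed: Replaces A's per-start-position slice comparison with column-wise candidate filtering: the set of surviving start positions is pruned by one pattern position at a time, so the window is traversed by pattern column instead of by start index.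
import Mathlib
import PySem

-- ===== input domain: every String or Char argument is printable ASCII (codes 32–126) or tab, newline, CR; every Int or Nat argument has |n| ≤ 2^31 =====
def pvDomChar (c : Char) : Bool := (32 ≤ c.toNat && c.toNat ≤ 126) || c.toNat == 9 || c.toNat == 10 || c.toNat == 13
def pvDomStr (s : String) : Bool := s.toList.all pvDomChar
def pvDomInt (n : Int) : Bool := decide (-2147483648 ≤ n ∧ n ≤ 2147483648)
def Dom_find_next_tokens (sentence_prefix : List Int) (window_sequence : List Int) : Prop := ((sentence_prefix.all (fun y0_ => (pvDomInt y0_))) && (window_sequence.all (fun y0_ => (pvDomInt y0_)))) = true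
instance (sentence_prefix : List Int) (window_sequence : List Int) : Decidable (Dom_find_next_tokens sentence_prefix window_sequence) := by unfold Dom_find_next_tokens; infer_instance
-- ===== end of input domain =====

-- B replaces A's per-position slice comparison with column-wise candidate filtering
-- (one pruning pass per pattern position); objective: alternative algorithm, same result.

-- ===== PORT A =====
def find_next_tokens (sentence_prefix : List Int) (window_sequence : List Int) : List Int :=
  let prefix_length : Int := sentence_prefix.length
  (PySem.List.pyRange 0 ((window_sequence.length : Int) - prefix_length + 1) 1).foldl
    (fun next_tokens_set i =>
      if PySem.List.slice window_sequence (some i) (some (i + prefix_length)) = sentence_prefix then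
        if i + prefix_length < (window_sequence.length : Int) then
          -- index i + prefix_length is guarded in range, so pyGetD's default is never used
          PySem.Set.add next_tokens_set (PySem.List.pyGetD window_sequence (i + prefix_length) 0)
        else next_tokens_set
      else next_tokens_set)
    PySem.Set.empty

-- ===== PORT B =====
def find_next_tokens_alt (sentence_prefix : List Int) (window_sequence : List Int) : List Int :=
  let n : Int := window_sequence.length
  let m : Int := sentence_prefix.length
  let cands0 := PySem.List.pyRange 0 (n - m + 1) 1
  let cands := (PySem.List.pyRange 0 m 1).foldl
    (fun cs k =>
      let t := PySem.List.pyGetD sentence_prefix k 0   -- k < m: in range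
      cs.filter (fun i => PySem.List.pyGetD window_sequence (i + k) 0 == t))
    cands0
  cands.foldl
    (fun next_tokens_set i =>
      if i + m < n then
        PySem.Set.add next_tokens_set (PySem.List.pyGetD window_sequence (i + m) 0)
      else next_tokens_set)
    PySem.Set.empty

-- ===== PRECONDITION & SPEC =====
def Spec_find_next_tokens (sentence_prefix : List Int) (window_sequence : List Int) (out : List Int) : Prop := out = find_next_tokens_alt sentence_prefix window_sequence
instance (sentence_prefix : List Int) (window_sequence : List Int) (out : List Int) : Decidable (Spec_find_next_tokens sentence_prefix window_sequence out) := by unfold Spec_find_next_tokens; infer_instance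

-- ===== CLAIM (what is proved, stated in full; the proofs are below) =====
def Claim_equal_find_next_tokens : Prop := ∀ (sentence_prefix : List Int) (window_sequence : List Int), Dom_find_next_tokens sentence_prefix window_sequence → Spec_find_next_tokens sentence_prefix window_sequence (find_next_tokens sentence_prefix window_sequence)

-- ===== LEMMAS AND PROOFS =====

-- B's sequential per-column filtering of candidate positions equals one filter by
-- "window matches the first K pattern positions".
lemma filt_fold (sp ws cs : List Int) (K : Nat) :
    (PySem.List.pyRange 0 (K:Int) 1).foldl
      (fun cs k => cs.filter (fun i => PySem.List.pyGetD ws (i + k) 0 == PySem.List.pyGetD sp k 0)) cs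
    = cs.filter (fun i => decide (∀ k : Nat, k < K →
        PySem.List.pyGetD ws (i + (k:Int)) 0 = PySem.List.pyGetD sp (k:Int) 0)) := by
  induction K with
  | zero =>
      simp [PySem.List.pyRange_one_eq_nil]
  | succ K ih =>
      have hc : ((K+1:Nat):Int) = (K:Int) + 1 := by push_cast; ring
      rw [hc, PySem.List.pyRange_one_succ_right (by positivity), List.foldl_append, ih]
      simp only [List.foldl_cons, List.foldl_nil, List.filter_filter]
      refine List.filter_congr ?_
      intro i _
      rw [Bool.eq_iff_iff]
      simp only [Bool.and_eq_true, decide_eq_true_eq, beq_iff_eq, Nat.lt_succ_iff_lt_or_eq]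
      constructor
      · rintro ⟨h2, h1⟩ k (hk | rfl)
        · exact h1 k hk
        · exact h2
      · intro h
        exact ⟨h K (Or.inr rfl), fun k hk => h k (Or.inl hk)⟩

-- A's slice-equality test equals B's pointwise test, for in-range start positions.
lemma slice_eq_iff (sp ws : List Int) (i : Int) (h0 : 0 ≤ i)
    (h1 : i + (sp.length : Int) ≤ (ws.length : Int)) :
    (PySem.List.slice ws (some i) (some (i + (sp.length : Int))) = sp)
    ↔ (∀ k : Nat, k < sp.length →
        PySem.List.pyGetD ws (i + (k:Int)) 0 = PySem.List.pyGetD sp (k:Int) 0) := by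
  have hsl : PySem.List.slice ws (some i) (some (i + (sp.length:Int)))
      = (ws.drop i.toNat).take sp.length := by
    rw [PySem.List.slice_toNat ws h0 (by omega)]
    congr 1
    omega
  have hget : ∀ k : Nat, (hk : k < sp.length) →
      PySem.List.pyGetD ws (i + (k:Int)) 0 = ws[i.toNat + k]'(by omega) := by
    intro k hk
    rw [PySem.List.pyGetD_eq_getElem ws 0 (by omega) (by omega)]
    congr 1
    omega
  have hgetp : ∀ k : Nat, (hk : k < sp.length) →
      PySem.List.pyGetD sp (k:Int) 0 = sp[k]'hk := by
    intro k hk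
    rw [PySem.List.pyGetD_natCast]
    exact List.getD_eq_getElem sp 0 hk
  have hlen : ((ws.drop i.toNat).take sp.length).length = sp.length := by
    simp; omega
  rw [hsl]
  constructor
  · intro heq k hk
    rw [hget k hk, hgetp k hk]
    have hkk : k < ((ws.drop i.toNat).take sp.length).length := by omega
    have h2 : ((ws.drop i.toNat).take sp.length)[k]'hkk = sp[k]'hk := by
      simp only [heq]
    simpa [List.getElem_take, List.getElem_drop] using h2
  · intro h
    apply List.ext_getElem hlen
    intro k hk1 hk2
    have := h k hk2
    rw [hget k hk2, hgetp k hk2] at this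
    simpa [List.getElem_take, List.getElem_drop] using this

lemma ports_agree (sp ws : List Int) : find_next_tokens sp ws = find_next_tokens_alt sp ws := by
  simp only [find_next_tokens, find_next_tokens_alt]
  rw [filt_fold]
  rw [PySem.List.foldl_ite_eq_foldl_filter
    (p := fun i => PySem.List.slice ws (some i) (some (i + (sp.length:Int))) = sp)
    (f := fun s i => if i + (sp.length:Int) < (ws.length:Int) then
        PySem.Set.add s (PySem.List.pyGetD ws (i + (sp.length:Int)) 0) else s)]
  congr 1
  refine List.filter_congr ?_
  intro i hi
  rw [PySem.List.mem_pyRange_one] at hi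
  rw [decide_eq_decide]
  exact slice_eq_iff sp ws i hi.1 (by omega)

-- ===== VERDICT (by name: the statement is the Claim_ definition above) =====
theorem find_next_tokens_spec : Claim_equal_find_next_tokens := by
  intro sp ws _
  exact ports_agree sp ws
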